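-- pv_equiv track=rewrite | github.com/diogodiasgrilo/CALYPSO | services/homer/data_collector.py | _match_original_to_new
-- ===== SOURCE A (Python) =====
-- from typing import Any, Dict, List, Optional
--
-- def _match_original_to_new(
--     original_to_new: Dict[str, List[tuple]], orig_entry_num: str, event_timestamp: str
-- ) -> Optional[str]:
--     """
--     Fallback: match by original entry number + timestamp proximity.
--
--     Args:
--         original_to_new: Maps original entry num -> [(new_num, timestamp_str), ...].
--         orig_entry_num: Original bot entry number.
--         event_timestamp: Timestamp of the event (stop/salvage).
--
--     Returns:
--         Matched new entry number string, or None.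
--     """
--     candidates = original_to_new.get(orig_entry_num, [])
--     if not candidates:
--         return None
--     if len(candidates) == 1:
--         return candidates[0][0]
--     # Find entry with latest timestamp <= event timestamp
--     best = None
--     for new_num, entry_ts in candidates:
--         if entry_ts <= event_timestamp:
--             if best is None or entry_ts > best[1]:
--                 best = (new_num, entry_ts)
--     return best[0] if best else candidates[-1][0]
-- ===== SOURCE B (Python) =====
-- def _match_original_to_new(original_to_new, orig_entry_num, event_timestamp):
--     candidates = original_to_new.get(orig_entry_num, [])
--     if not candidates:
--         return None
--     # Stable descending sort by timestamp: the first entry with ts <= event_timestamp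
--     # is the latest eligible one, earliest-in-input among equal timestamps.
--     for new_num, entry_ts in sorted(candidates, key=lambda c: c[1], reverse=True):
--         if entry_ts <= event_timestamp:
--             return new_num
--     return candidates[-1][0]
-- ===== Notes on version B (the rewrite author's own statement) =====
-- stated objective: alternative
-- what changed: Replaces A's single-pass running-best accumulator (with its len==1 shortcut and None sentinel) by a stable descending sort on timestamp followed by a first-match scan with early return; stability of sorted(..., reverse=True) reproduces A's first-wins tie-break, and the no-eligible fallback stays candidates[-1][0].
import Mathlib
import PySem

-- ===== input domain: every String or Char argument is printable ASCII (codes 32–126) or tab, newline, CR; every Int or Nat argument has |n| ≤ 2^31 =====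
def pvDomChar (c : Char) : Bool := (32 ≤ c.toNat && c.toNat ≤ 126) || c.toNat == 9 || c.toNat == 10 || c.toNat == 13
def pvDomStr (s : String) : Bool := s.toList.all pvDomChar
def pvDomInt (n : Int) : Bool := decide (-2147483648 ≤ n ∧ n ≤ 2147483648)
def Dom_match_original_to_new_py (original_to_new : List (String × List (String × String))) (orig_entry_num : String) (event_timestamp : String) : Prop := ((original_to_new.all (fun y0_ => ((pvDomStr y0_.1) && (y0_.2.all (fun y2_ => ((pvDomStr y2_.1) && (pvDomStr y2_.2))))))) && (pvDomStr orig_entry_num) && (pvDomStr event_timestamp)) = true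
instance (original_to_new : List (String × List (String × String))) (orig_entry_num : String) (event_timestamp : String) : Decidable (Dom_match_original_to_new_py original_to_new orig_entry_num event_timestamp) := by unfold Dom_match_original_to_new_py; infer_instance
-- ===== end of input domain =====

-- B replaces A's running-best accumulator (and len==1 shortcut) by a stable descending
-- sort by timestamp followed by a first-match scan: alternative decomposition, same result.

-- ===== PORT A =====
def match_original_to_new_py (original_to_new : List (String × List (String × String))) (orig_entry_num : String) (event_timestamp : String) : Option String :=
  let candidates := PySem.Dict.getD (PySem.Dict.mk original_to_new) orig_entry_num []
  if candidates = [] then none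
  else if candidates.length = 1 then
    -- candidates[0][0]; the list is non-empty here, so pyGet? cannot be none
    match PySem.List.pyGet? candidates 0 with
    | some c => some c.1
    | none => none
  else
    let best := candidates.foldl (fun best c =>
      if c.2 ≤ event_timestamp then
        match best with
        | none => some c
        | some b => if c.2 > b.2 then some c else some b
      else best) (none : Option (String × String))
    match best with
    | some b => some b.1
    | none =>
      -- candidates[-1][0]; the list is non-empty here, so pyGet? cannot be none
      match PySem.List.pyGet? candidates (-1) with
      | some c => some c.1
      | none => none

-- ===== PORT B =====
def match_original_to_new_py_alt (original_to_new : List (String × List (String × String))) (orig_entry_num : String) (event_timestamp : String) : Option String :=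
  let candidates := PySem.Dict.getD (PySem.Dict.mk original_to_new) orig_entry_num []
  if candidates = [] then none
  else
    -- for-loop with early return over sorted(candidates, key=c[1], reverse=True) = find?
    match (PySem.List.sorted candidates (fun c => c.2) true).find?
            (fun c => decide (c.2 ≤ event_timestamp)) with
    | some c => some c.1
    | none =>
      -- candidates[-1][0]; the list is non-empty here, so pyGet? cannot be none
      match PySem.List.pyGet? candidates (-1) with
      | some c => some c.1
      | none => none

-- ===== PRECONDITION & SPEC =====
def Spec_match_original_to_new_py (original_to_new : List (String × List (String × String))) (orig_entry_num : String) (event_timestamp : String) (out : Option String) : Prop := out = match_original_to_new_py_alt original_to_new orig_entry_num event_timestamp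
instance (original_to_new : List (String × List (String × String))) (orig_entry_num : String) (event_timestamp : String) (out : Option String) : Decidable (Spec_match_original_to_new_py original_to_new orig_entry_num event_timestamp out) := by unfold Spec_match_original_to_new_py; infer_instance

-- ===== CLAIM (what is proved, stated in full; the proofs are below) =====
def Claim_equal_match_original_to_new_py : Prop := ∀ (original_to_new : List (String × List (String × String))) (orig_entry_num : String) (event_timestamp : String), Dom_match_original_to_new_py original_to_new orig_entry_num event_timestamp → Spec_match_original_to_new_py original_to_new orig_entry_num event_timestamp (match_original_to_new_py original_to_new orig_entry_num event_timestamp)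

-- ===== LEMMAS AND PROOFS =====

-- Inserting c into a descending (by .2) list: the first p-satisfying element of the result
-- is A's running-best step applied to the first p-satisfying element of the old list.
theorem find?_insertBy (p : String × String → Bool) (c : String × String)
    (acc : List (String × String)) (hp : acc.Pairwise (fun a b => b.2 ≤ a.2)) :
    (PySem.List.insertBy (fun a b => decide (b.2 < a.2)) c acc).find? p
    = if p c then
        (match acc.find? p with
         | none => some c
         | some b => if b.2 < c.2 then some c else some b)
      else acc.find? p := by
  induction acc with
  | nil =>
    by_cases h : p c = true <;> simp [PySem.List.insertBy, List.find?, h]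
  | cons y ys ih =>
    rw [List.pairwise_cons] at hp
    by_cases hb : y.2 < c.2
    · -- c goes in front
      have hins : PySem.List.insertBy (fun a b => decide (b.2 < a.2)) c (y :: ys) = c :: y :: ys := by
        simp [PySem.List.insertBy, hb]
      rw [hins]
      by_cases hc : p c = true
      · rw [List.find?_cons_of_pos hc, if_pos hc]
        cases hfy : (y :: ys).find? p with
        | none => rfl
        | some b =>
          have hbmem : b ∈ y :: ys := List.mem_of_find?_eq_some hfy
          have hble : b.2 ≤ y.2 := by
            rcases List.mem_cons.mp hbmem with h | h
            · exact h ▸ le_rfl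
            · exact hp.1 b h
          simp [lt_of_le_of_lt hble hb]
      · rw [List.find?_cons_of_neg hc, if_neg hc]
    · -- c goes after y
      have hins : PySem.List.insertBy (fun a b => decide (b.2 < a.2)) c (y :: ys)
          = y :: PySem.List.insertBy (fun a b => decide (b.2 < a.2)) c ys := by
        simp [PySem.List.insertBy, hb]
      rw [hins]
      by_cases hy : p y = true
      · simp only [List.find?_cons_of_pos hy]
        by_cases hc : p c = true
        · rw [if_pos hc]
          exact (if_neg hb).symm
        · rw [if_neg hc]
      · simp only [List.find?_cons_of_neg hy]
        exact ih hp.2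

-- The first eligible element of the descending sort IS A's running-best fold.
theorem find?_sorted (p : String × String → Bool) (cs : List (String × String)) :
    (PySem.List.sorted cs (fun c => c.2) true).find? p
    = cs.foldl (fun m c =>
        if p c then
          (match m with
           | none => some c
           | some b => if b.2 < c.2 then some c else some b)
        else m) none := by
  induction cs using List.reverseRecOn with
  | nil => rfl
  | append_singleton cs c ih =>
    rw [PySem.List.sorted_rev_eq_foldl_insertBy, List.foldl_append, List.foldl_append]
    rw [← PySem.List.sorted_rev_eq_foldl_insertBy]
    simp only [List.foldl_cons, List.foldl_nil]
    rw [find?_insertBy p c _ (PySem.List.sorted_pairwise_rev cs (fun c => c.2)), ih]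

-- ===== VERDICT (by name: the statement is the Claim_ definition above) =====
theorem match_original_to_new_py_spec : Claim_equal_match_original_to_new_py := by
  intro original_to_new orig_entry_num event_timestamp _
  unfold Spec_match_original_to_new_py match_original_to_new_py match_original_to_new_py_alt
  set cs := PySem.Dict.getD (PySem.Dict.mk original_to_new) orig_entry_num [] with hcs
  clear_value cs
  by_cases h0 : cs = []
  · simp only [h0, if_true]
  · simp only [if_neg h0]
    rw [find?_sorted (fun c => decide (c.2 ≤ event_timestamp)) cs]
    have hfold : cs.foldl (fun m c =>
        if (fun c : String × String => decide (c.2 ≤ event_timestamp)) c then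
          (match m with
           | none => some c
           | some b => if b.2 < c.2 then some c else some b)
        else m) none
      = cs.foldl (fun best c =>
          if c.2 ≤ event_timestamp then
            match best with
            | none => some c
            | some b => if c.2 > b.2 then some c else some b
          else best) (none : Option (String × String)) := by
      apply List.foldl_ext
      intro acc x _
      by_cases hx : x.2 ≤ event_timestamp <;> simp [hx]
    rw [hfold]
    by_cases h1 : cs.length = 1
    · obtain ⟨c, hc⟩ : ∃ c, cs = [c] := by
        match cs, h1 with
        | [c], _ => exact ⟨c, rfl⟩
      subst hc
      rw [if_pos h1]
      simp only [List.foldl_cons, List.foldl_nil]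
      by_cases hle : c.2 ≤ event_timestamp
      · rw [if_pos hle]
        rfl
      · rw [if_neg hle]
        rfl
    · rw [if_neg h1]
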